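-- pv_equiv track=rewrite | github.com/nydhy/LLMshield-ai | app/services/sieve.py | separate_messages
-- ===== SOURCE A (Python) =====
-- from typing import List, Dict, Optional
--
-- def separate_messages(messages: List[Dict]) -> tuple[List[Dict], Optional[str]]:
--     """
--     Separate system and user messages for system prompt pinning.
--     Only user messages should be compressed to preserve security guardrails.
--
--     Args:
--         messages: List of message dicts with 'role' and 'content'
--
--     Returns:
--         Tuple of (system_messages, user_content)
--     """
--     system_messages = []
--     user_content = None
--
--     for msg in messages:
--         role = msg.get("role", "")
--         if role == "system":
--             system_messages.append(msg)
--         elif role == "user":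
--             # Get the last user message (most recent prompt)
--             user_content = msg.get("content", "")
--
--     return system_messages, user_content
-- ===== SOURCE B (Python) =====
-- from typing import List, Dict, Optional
--
-- def separate_messages(messages: List[Dict]) -> tuple[List[Dict], Optional[str]]:
--     system_messages = [m for m in messages if m.get("role", "") == "system"]
--     last_user = next((m for m in reversed(messages) if m.get("role", "") == "user"), None)
--     user_content = None if last_user is None else last_user.get("content", "")
--     return system_messages, user_content
-- ===== Notes on version B (the rewrite author's own statement) =====
-- stated objective: idiomatic
-- what changed: Replaces A's single accumulating forward loop by a forward filter for system messages plus a separate backward early-terminating search (next over reversed) for the last user message's content.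
import Mathlib
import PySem

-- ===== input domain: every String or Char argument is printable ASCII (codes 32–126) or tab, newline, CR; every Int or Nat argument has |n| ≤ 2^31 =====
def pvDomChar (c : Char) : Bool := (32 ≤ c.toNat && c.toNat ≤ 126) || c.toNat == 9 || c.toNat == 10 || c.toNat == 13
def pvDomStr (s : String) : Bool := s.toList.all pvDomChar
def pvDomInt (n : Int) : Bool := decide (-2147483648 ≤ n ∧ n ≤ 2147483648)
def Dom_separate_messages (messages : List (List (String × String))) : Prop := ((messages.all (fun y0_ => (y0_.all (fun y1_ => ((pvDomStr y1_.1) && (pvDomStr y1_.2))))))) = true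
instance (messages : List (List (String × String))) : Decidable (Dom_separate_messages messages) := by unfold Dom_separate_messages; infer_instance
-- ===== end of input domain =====

-- B replaces A's single accumulating forward loop by a forward filter plus a separate
-- backward early-terminating search for the last user message (objective: idiomatic).

-- shared helper: msg.get(key, dflt) on an association list (first match)
def msgGetD (msg : List (String × String)) (key dflt : String) : String :=
  match msg.find? (fun p => p.1 == key) with
  | some p => p.2
  | none => dflt

-- ===== PORT A =====
def separate_messages (messages : List (List (String × String))) : (List (List (String × String))) × Option String :=
  messages.foldl
    (fun (st : List (List (String × String)) × Option String) msg =>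
      let role := msgGetD msg "role" ""
      if role == "system" then (st.1 ++ [msg], st.2)
      else if role == "user" then (st.1, some (msgGetD msg "content" ""))
      else st)
    ([], none)

-- ===== PORT B =====
def separate_messages_alt (messages : List (List (String × String))) : (List (List (String × String))) × Option String :=
  let system_messages := messages.filter (fun m => msgGetD m "role" "" == "system")
  let last_user := messages.reverse.find? (fun m => msgGetD m "role" "" == "user")
  (system_messages, last_user.map (fun m => msgGetD m "content" ""))

-- ===== PRECONDITION & SPEC =====
def Spec_separate_messages (messages : List (List (String × String))) (out : (List (List (String × String))) × Option String) : Prop := out = separate_messages_alt messages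
instance (messages : List (List (String × String))) (out : (List (List (String × String))) × Option String) : Decidable (Spec_separate_messages messages out) := by unfold Spec_separate_messages; infer_instance

-- ===== CLAIM (what is proved, stated in full; the proofs are below) =====
def Claim_equal_separate_messages : Prop := ∀ (messages : List (List (String × String))), Dom_separate_messages messages → Spec_separate_messages messages (separate_messages messages)

-- ===== LEMMAS AND PROOFS =====

lemma separate_messages_foldl
    (messages : List (List (String × String)))
    (s : List (List (String × String))) (u : Option String) :
    messages.foldl
      (fun (st : List (List (String × String)) × Option String) msg =>
        let role := msgGetD msg "role" ""
        if role == "system" then (st.1 ++ [msg], st.2)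
        else if role == "user" then (st.1, some (msgGetD msg "content" ""))
        else st)
      (s, u)
    = (s ++ messages.filter (fun m => msgGetD m "role" "" == "system"),
       match messages.reverse.find? (fun m => msgGetD m "role" "" == "user") with
       | some m => some (msgGetD m "content" "")
       | none => u) := by
  induction messages generalizing s u with
  | nil => simp
  | cons m rest ih =>
    simp only [List.foldl_cons, List.reverse_cons, List.find?_append, List.filter_cons]
    by_cases hs : msgGetD m "role" "" == "system"
    · have hu : (msgGetD m "role" "" == "user") = false := by
        simp_all
      rw [if_pos hs]
      simp only [ih, hs, if_pos]
      cases rest.reverse.find? (fun m => msgGetD m "role" "" == "user") <;> simp [hu]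
    · rw [if_neg (by simpa using hs)]
      by_cases hu : msgGetD m "role" "" == "user"
      · rw [if_pos hu]
        simp only [ih, hs]
        cases rest.reverse.find? (fun m => msgGetD m "role" "" == "user") <;> simp [hu]
      · rw [if_neg (by simpa using hu)]
        simp only [ih, hs]
        cases rest.reverse.find? (fun m => msgGetD m "role" "" == "user") <;>
          simp [hu]

-- ===== VERDICT (by name: the statement is the Claim_ definition above) =====
theorem separate_messages_spec : Claim_equal_separate_messages := by
  intro messages _
  unfold Spec_separate_messages separate_messages separate_messages_alt
  rw [separate_messages_foldl]
  simp only [List.nil_append]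
  cases messages.reverse.find? (fun m => msgGetD m "role" "" == "user") <;> simp
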